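-- pv_equiv track=rewrite | github.com/chausen/codejam | 2021/reversort/solution.py | reversort_cost
-- ===== SOURCE A (Python) =====
-- import math
--
-- def reversort_cost(N, L):
--     cost = 0
--     for i in range(N):
--         min_val = math.inf
--         min_val_idx = 0
--         for j in range(i, N):
--             if L[j] < min_val:
--                 min_val = L[j]
--                 min_val_idx = j
--         cost += min_val_idx - i + 1
--
--     return cost
-- ===== SOURCE B (Python) =====
-- def reversort_cost(N, L):
--     cost = 0
--     min_idx = None
--     for i in range(N - 1, -1, -1):
--         if min_idx is None or L[i] <= L[min_idx]:
--             min_idx = i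
--         cost += min_idx - i + 1
--     return cost
-- ===== Notes on version B (the rewrite author's own statement) =====
-- stated objective: faster
-- what changed: Replaced the nested argmin rescan of each suffix with a single backward pass that maintains the earliest-minimum index incrementally.
import Mathlib
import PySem

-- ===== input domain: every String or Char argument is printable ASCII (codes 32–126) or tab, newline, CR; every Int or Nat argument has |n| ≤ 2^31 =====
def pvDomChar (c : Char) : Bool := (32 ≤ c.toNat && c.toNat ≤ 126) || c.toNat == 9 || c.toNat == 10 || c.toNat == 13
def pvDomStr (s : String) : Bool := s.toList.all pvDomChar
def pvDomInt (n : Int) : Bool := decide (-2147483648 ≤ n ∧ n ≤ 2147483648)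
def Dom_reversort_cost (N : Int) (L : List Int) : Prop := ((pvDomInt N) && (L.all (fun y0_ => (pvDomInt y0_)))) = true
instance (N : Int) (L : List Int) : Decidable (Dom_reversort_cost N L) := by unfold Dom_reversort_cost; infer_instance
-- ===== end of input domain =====

-- B replaces A's O(N^2) per-suffix argmin rescan by one O(N) backward pass keeping the earliest-minimum index.

-- ===== PORT A =====
-- inner-loop body of A: math.inf is modeled by `none` (every int is < inf);
-- L[j] is ported as pyGetD L j 0, exact inside Pre_ (0 ≤ j < N ≤ len L, so no IndexError)
def aInner (L : List Int) (s : Option Int × Int) (j : Int) : Option Int × Int :=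
  match s.1 with
  | none => (some (PySem.List.pyGetD L j 0), j)
  | some mv =>
      if PySem.List.pyGetD L j 0 < mv then (some (PySem.List.pyGetD L j 0), j) else s

def reversort_cost (N : Int) (L : List Int) : Int :=
  (PySem.List.pyRange 0 N 1).foldl
    (fun cost i =>
      let s := (PySem.List.pyRange i N 1).foldl (aInner L) (none, 0)
      cost + (s.2 - i + 1))
    0

-- ===== PORT B =====
-- loop body of B: state = (cost, min_idx); min_idx = None is `none`
def bStep (L : List Int) (s : Int × Option Int) (i : Int) : Int × Option Int :=
  let m : Int :=
    match s.2 with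
    | none => i
    | some m => if PySem.List.pyGetD L i 0 ≤ PySem.List.pyGetD L m 0 then i else m
  (s.1 + (m - i + 1), some m)

def reversort_cost_alt (N : Int) (L : List Int) : Int :=
  ((PySem.List.pyRange (N - 1) (-1) (-1)).foldl (bStep L) (0, none)).1

-- ===== PRECONDITION & SPEC =====
-- Pre_ excludes exactly the inputs where the Pythons raise IndexError (N exceeding len(L))
def Pre_reversort_cost (N : Int) (L : List Int) : Prop := N ≤ (L.length : Int)
instance (N : Int) (L : List Int) : Decidable (Pre_reversort_cost N L) := by
  unfold Pre_reversort_cost; infer_instance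

def pvWitness_reversort_cost : Int × List Int := (3, [2, 1, 3])

def Spec_reversort_cost (N : Int) (L : List Int) (out : Int) : Prop := out = reversort_cost_alt N L
instance (N : Int) (L : List Int) (out : Int) : Decidable (Spec_reversort_cost N L out) := by
  unfold Spec_reversort_cost; infer_instance

-- ===== CLAIM (what is proved, stated in full; the proofs are below) =====
def Claim_equal_reversort_cost : Prop := ∀ (N : Int) (L : List Int), Dom_reversort_cost N L → Pre_reversort_cost N L → Spec_reversort_cost N L (reversort_cost N L)

-- ===== LEMMAS AND PROOFS =====

-- earliest index of the minimum of L over [i, n)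
def fmI (L : List Int) (n : Int) (i : Int) : Int :=
  if _h : i + 1 < n then
    let m := fmI L n (i + 1)
    if PySem.List.pyGetD L i 0 ≤ PySem.List.pyGetD L m 0 then i else m
  else i
termination_by (n - i).toNat
decreasing_by all_goals omega

-- total cost contributed by rows n-1 down to … i (T … (-1) = 0)
def T (L : List Int) (n : Int) (i : Int) : Int :=
  if _h : 0 ≤ i then T L n (i - 1) + (fmI L n i - i + 1) else 0
termination_by (i + 1).toNat
decreasing_by all_goals omega

lemma fmI_eq (L : List Int) (n i : Int) :
    fmI L n i = if i + 1 < n then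
      (if PySem.List.pyGetD L i 0 ≤ PySem.List.pyGetD L (fmI L n (i + 1)) 0 then i
       else fmI L n (i + 1))
    else i := by
  conv_lhs => rw [fmI]
  split_ifs <;> simp_all

lemma aInner_seed (L : List Int) (n : Int) :
    ∀ (a : Int) (v k : Int), a ≤ n →
      (PySem.List.pyRange a n 1).foldl (aInner L) (some v, k) =
        if a < n ∧ PySem.List.pyGetD L (fmI L n a) 0 < v then
          (some (PySem.List.pyGetD L (fmI L n a) 0), fmI L n a)
        else (some v, k) := by
  intro a v k ha
  by_cases h : a < n
  · rw [PySem.List.pyRange_one_cons h]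
    simp only [List.foldl_cons, aInner]
    have hga := fmI_eq L n a
    by_cases hlt : PySem.List.pyGetD L a 0 < v
    · rw [if_pos hlt, aInner_seed L n (a + 1) _ _ (by omega)]
      by_cases h1 : a + 1 < n
      · rw [if_pos h1] at hga
        by_cases hle : PySem.List.pyGetD L a 0 ≤ PySem.List.pyGetD L (fmI L n (a + 1)) 0
        · rw [if_pos hle] at hga
          rw [hga, if_neg (by omega), if_pos ⟨h, hlt⟩]
        · rw [if_neg hle] at hga
          rw [hga, if_pos ⟨h1, by omega⟩, if_pos ⟨h, by omega⟩]
      · rw [if_neg h1] at hga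
        rw [hga, if_neg (by simp [h1]), if_pos ⟨h, hlt⟩]
    · rw [if_neg hlt, aInner_seed L n (a + 1) _ _ (by omega)]
      by_cases h1 : a + 1 < n
      · rw [if_pos h1] at hga
        by_cases hle : PySem.List.pyGetD L a 0 ≤ PySem.List.pyGetD L (fmI L n (a + 1)) 0
        · rw [if_pos hle] at hga
          rw [hga, if_neg (by omega), if_neg (by omega)]
        · rw [if_neg hle] at hga
          rw [hga]
          by_cases hc : PySem.List.pyGetD L (fmI L n (a + 1)) 0 < v
          · rw [if_pos ⟨h1, hc⟩, if_pos ⟨h, hc⟩]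
          · rw [if_neg (by simp [hc]), if_neg (by simp [hc])]
      · rw [if_neg h1] at hga
        rw [hga, if_neg (by simp [h1]), if_neg (by omega)]
  · rw [PySem.List.pyRange_one_eq_nil (by omega)]
    simp [h]
termination_by a => (n - a).toNat
decreasing_by all_goals omega

lemma aInner_full (L : List Int) (n i : Int) (h : i < n) :
    (PySem.List.pyRange i n 1).foldl (aInner L) (none, 0) =
      (some (PySem.List.pyGetD L (fmI L n i) 0), fmI L n i) := by
  rw [PySem.List.pyRange_one_cons h]
  simp only [List.foldl_cons, aInner]
  rw [aInner_seed L n (i + 1) _ _ (by omega)]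
  have hga := fmI_eq L n i
  by_cases h1 : i + 1 < n
  · rw [if_pos h1] at hga
    by_cases hle : PySem.List.pyGetD L i 0 ≤ PySem.List.pyGetD L (fmI L n (i + 1)) 0
    · rw [if_pos hle] at hga
      rw [hga, if_neg (by omega)]
    · rw [if_neg hle] at hga
      rw [hga, if_pos ⟨h1, by omega⟩]
  · rw [if_neg h1] at hga
    rw [hga, if_neg (by simp [h1])]

lemma outerA (L : List Int) (n : Int) :
    ∀ (a : Int) (c : Int), 0 ≤ a → a ≤ n →
      (PySem.List.pyRange a n 1).foldl
        (fun cost i =>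
          let s := (PySem.List.pyRange i n 1).foldl (aInner L) (none, 0)
          cost + (s.2 - i + 1)) c
      = c + T L n (n - 1) - T L n (a - 1) := by
  intro a c h0 ha
  by_cases h : a < n
  · rw [PySem.List.pyRange_one_cons h]
    simp only [List.foldl_cons]
    rw [aInner_full L n a h]
    rw [outerA L n (a + 1) _ (by omega) (by omega)]
    have hT : T L n a = T L n (a - 1) + (fmI L n a - a + 1) := by
      conv_lhs => rw [T]
      rw [dif_pos h0]
    simp only [show a + 1 - 1 = a by ring]
    omega
  · have hna : a = n := by omega
    rw [PySem.List.pyRange_one_eq_nil (by omega)]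
    simp [hna]
termination_by a => (n - a).toNat
decreasing_by all_goals omega

lemma bLoop (L : List Int) (n : Int) :
    ∀ (i : Int) (c : Int), -1 ≤ i → i + 1 < n →
      ((PySem.List.pyRange i (-1) (-1)).foldl (bStep L) (c, some (fmI L n (i + 1)))).1
        = c + T L n i := by
  intro i c h0 hn
  by_cases h : 0 ≤ i
  · rw [PySem.List.pyRange_neg_one_cons (by omega)]
    simp only [List.foldl_cons, bStep]
    have hfm : (if PySem.List.pyGetD L i 0 ≤ PySem.List.pyGetD L (fmI L n (i + 1)) 0 then i
        else fmI L n (i + 1)) = fmI L n i := by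
      rw [fmI_eq L n i, if_pos hn]
    rw [hfm]
    have ihb := bLoop L n (i - 1) (c + (fmI L n i - i + 1)) (by omega) (by omega)
    rw [show i - 1 + 1 = i by ring] at ihb
    rw [ihb]
    have hT : T L n i = T L n (i - 1) + (fmI L n i - i + 1) := by
      conv_lhs => rw [T]
      rw [dif_pos h]
    omega
  · have : i = -1 := by omega
    subst this
    rw [PySem.List.pyRange_neg_one_eq_nil (by omega)]
    rw [T, dif_neg (by omega)]
    simp
termination_by i => (i + 1).toNat
decreasing_by all_goals omega

lemma altEq (N : Int) (L : List Int) : reversort_cost_alt N L = T L N (N - 1) := by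
  unfold reversort_cost_alt
  by_cases h : 1 ≤ N
  · rw [PySem.List.pyRange_neg_one_cons (by omega)]
    simp only [List.foldl_cons, bStep]
    have hfm : fmI L N (N - 1) = N - 1 := by
      rw [fmI_eq L N (N - 1), if_neg (by omega)]
    have hb := bLoop L N (N - 2) (0 + (N - 1 - (N - 1) + 1)) (by omega) (by omega)
    rw [show N - 2 + 1 = N - 1 by ring, hfm] at hb
    rw [show N - 1 - 1 = N - 2 by ring, hb]
    have hT : T L N (N - 1) = T L N (N - 2) + (fmI L N (N - 1) - (N - 1) + 1) := by
      conv_lhs => rw [T]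
      rw [dif_pos (show (0:Int) ≤ N - 1 by omega), show N - 1 - 1 = N - 2 by ring]
    omega
  · rw [PySem.List.pyRange_neg_one_eq_nil (by omega)]
    rw [T, dif_neg (show ¬ (0:Int) ≤ N - 1 by omega)]
    rfl

-- ===== VERDICT (by name: the statement is the Claim_ definition above) =====
theorem reversort_cost_spec : Claim_equal_reversort_cost := by
  intro N L _hDom _hPre
  unfold Spec_reversort_cost reversort_cost
  rw [altEq]
  by_cases h : 0 ≤ N
  · rw [outerA L N 0 0 le_rfl (by omega)]
    have h0 : T L N (0 - 1) = 0 := by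
      rw [T, dif_neg (show ¬ (0:Int) ≤ 0 - 1 by omega)]
    rw [h0]
    ring
  · rw [PySem.List.pyRange_one_eq_nil (by omega)]
    rw [T, dif_neg (show ¬ (0:Int) ≤ N - 1 by omega)]
    rfl
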